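-- pv_equiv track=rewrite | github.com/OctoPrint/OctoPrint | src/octoprint/comm/protocol/reprap/util.py | strip_comment
-- ===== SOURCE A (Python) =====
-- def strip_comment(line):
-- 	if not ";" in line:
-- 		# shortcut
-- 		return line
--
-- 	escaped = False
-- 	result = []
-- 	for c in line:
-- 		if c == ";" and not escaped:
-- 			break
-- 		result += c
-- 		escaped = (c == "\\") and not escaped
-- 	return "".join(result).strip()
-- ===== SOURCE B (Python) =====
-- def _trailing_backslashes(s):
--     n = 0
--     for c in reversed(s):
--         if c != "\\":
--             break
--         n += 1
--     return n
--
--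
-- def strip_comment(line):
--     if ";" not in line:
--         # shortcut
--         return line
--     parts = line.split(";")
--     kept = parts[0]
--     for part in parts[1:]:
--         if _trailing_backslashes(kept) % 2 == 1:
--             # the semicolon after `kept` was escaped: keep it and continue
--             kept = kept + ";" + part
--         else:
--             break
--     return kept.strip()
-- ===== Notes on version B (the rewrite author's own statement) =====
-- stated objective: alternative
-- what changed: Replaces A's char-by-char scan with an escaped-flag state machine by splitting the line once at semicolons and re-joining split parts while the kept prefix ends in an odd run of backslashes (escaped semicolon), then stripping.
import Mathlib
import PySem

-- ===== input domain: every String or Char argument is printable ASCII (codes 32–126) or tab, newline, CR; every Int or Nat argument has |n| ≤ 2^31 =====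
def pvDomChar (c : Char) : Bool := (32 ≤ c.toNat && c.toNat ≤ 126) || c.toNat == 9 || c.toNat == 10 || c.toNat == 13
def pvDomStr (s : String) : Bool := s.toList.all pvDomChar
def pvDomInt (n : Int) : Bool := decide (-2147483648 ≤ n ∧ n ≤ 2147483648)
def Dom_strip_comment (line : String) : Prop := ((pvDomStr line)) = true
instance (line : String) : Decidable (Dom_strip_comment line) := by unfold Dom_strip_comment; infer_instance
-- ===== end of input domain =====

-- B replaces A's char-by-char escape-toggle scan by splitting on ";" and re-joining parts whose
-- preceding backslash run has odd length (alternative algorithm, same cost).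


-- ===== PORT A =====
-- the for-loop of A: state (escaped), break at an unescaped ';'
def pvALoop : List Char → Bool → List Char
  | [], _ => []
  | c :: rest, escaped =>
    if c == ';' && !escaped then []
    else c :: pvALoop rest ((c == '\\') && !escaped)

def strip_comment (line : String) : String :=
  if !(PySem.Str.isIn ";" line) then line
  else String.mk (PySem.Chars.strip (pvALoop line.toList false))

-- ===== PORT B =====
-- _trailing_backslashes: count over reversed(s), break at the first non-backslash
def pvTrailBSCount : List Char → Nat
  | [] => 0
  | c :: rest => if c ≠ '\\' then 0 else pvTrailBSCount rest + 1

def pvTrailBS (s : List Char) : Nat := pvTrailBSCount s.reverse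

-- the for-loop over parts[1:]: extend kept while its trailing backslash run is odd, else break
def pvBJoin : List Char → List (List Char) → List Char
  | kept, [] => kept
  | kept, part :: rest =>
    if pvTrailBS kept % 2 = 1 then pvBJoin (kept ++ ';' :: part) rest else kept

def strip_comment_alt (line : String) : String :=
  if !(PySem.Str.isIn ";" line) then line
  else
    match PySem.Chars.splitOn line.toList [';'] with
    | [] => ""   -- unreachable: split(";") never returns an empty list
    | p :: ps => String.mk (PySem.Chars.strip (pvBJoin p ps))

-- ===== PRECONDITION & SPEC =====
def Spec_strip_comment (line : String) (out : String) : Prop := out = strip_comment_alt line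
instance (line : String) (out : String) : Decidable (Spec_strip_comment line out) := by unfold Spec_strip_comment; infer_instance

-- ===== CLAIM (what is proved, stated in full; the proofs are below) =====
def Claim_equal_strip_comment : Prop := ∀ (line : String), Dom_strip_comment line → Spec_strip_comment line (strip_comment line)

-- ===== LEMMAS AND PROOFS =====

-- natural single-char split on ';'
def splitSemi : List Char → List (List Char)
  | [] => [[]]
  | c :: rest =>
    if c = ';' then [] :: splitSemi rest
    else
      match splitSemi rest with
      | [] => [[c]]
      | p :: ps => (c :: p) :: ps

def consHead (x : List Char) : List (List Char) → List (List Char)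
  | [] => [x]
  | p :: ps => (x ++ p) :: ps

def tailsGlue (ps : List (List Char)) : List Char := (ps.map (';' :: ·)).flatten

def escAfter : List Char → Bool → Bool
  | [], e => e
  | c :: rest, e => escAfter rest ((c == '\\') && !e)

theorem splitSemi_ne_nil (l : List Char) : splitSemi l ≠ [] := by
  induction l with
  | nil => simp [splitSemi]
  | cons c rest ih =>
    simp only [splitSemi]
    split
    · simp
    · cases h : splitSemi rest <;> simp

theorem consHead_nil (ps : List (List Char)) (h : ps ≠ []) : consHead [] ps = ps := by
  cases ps with
  | nil => exact absurd rfl h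
  | cons p t => simp [consHead]

theorem go_spec (l : List Char) (n : Nat) (cur : List Char) (acc : List (List Char))
    (h : l.length ≤ n) :
    PySem.Chars.splitOn.go [';'] n l cur acc = acc.reverse ++ consHead cur.reverse (splitSemi l) := by
  induction l generalizing n cur acc with
  | nil =>
    cases n <;> simp [PySem.Chars.splitOn.go, splitSemi, consHead]
  | cons c rest ih =>
    cases n with
    | zero => simp at h
    | succ m =>
      simp only [PySem.Chars.splitOn.go]
      by_cases hc : c = ';'
      · subst hc
        have hpre : List.isPrefixOf [';'] (';' :: rest) = true := by
          simp [List.isPrefixOf]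
        simp only [hpre, if_pos, List.length_cons, List.drop_succ_cons, List.length_nil, List.drop_zero]
        rw [ih m [] (cur.reverse :: acc) (by simpa using h)]
        simp only [List.reverse_nil]
        rw [consHead_nil _ (splitSemi_ne_nil rest)]
        simp [splitSemi, consHead]
      · have hpre : List.isPrefixOf [';'] (c :: rest) = false := by
          simp [List.isPrefixOf]
          intro hh; exact absurd hh.symm hc
        simp only [hpre, Bool.false_eq_true, if_false]
        rw [ih m (c :: cur) acc (by simpa using Nat.le_of_succ_le_succ h)]
        rcases hsp : splitSemi rest with _ | ⟨p, ps⟩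
        · exact absurd hsp (splitSemi_ne_nil rest)
        · simp [splitSemi, hc, hsp, consHead]

theorem splitOn_semi (l : List Char) : PySem.Chars.splitOn l [';'] = splitSemi l := by
  show PySem.Chars.splitOn.go [';'] (l.length + 1) l [] [] = splitSemi l
  rw [go_spec l (l.length + 1) [] [] (by omega)]
  simp [consHead_nil _ (splitSemi_ne_nil l)]

theorem splitSemi_decomp (l : List Char) (p : List Char) (ps : List (List Char))
    (h : splitSemi l = p :: ps) : l = p ++ tailsGlue ps := by
  induction l generalizing p ps with
  | nil =>
    simp [splitSemi] at h
    simp [h.1, h.2, tailsGlue]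
  | cons c rest ih =>
    by_cases hc : c = ';'
    · subst hc
      have h' : ([] : List Char) :: splitSemi rest = p :: ps := by
        simpa [splitSemi] using h
      injection h' with hp hps
      subst hp; subst hps
      rcases hq : splitSemi rest with _ | ⟨q, qs⟩
      · exact absurd hq (splitSemi_ne_nil rest)
      · simpa [tailsGlue] using ih q qs hq
    · simp only [splitSemi, if_neg hc] at h
      rcases hq : splitSemi rest with _ | ⟨q, qs⟩
      · exact absurd hq (splitSemi_ne_nil rest)
      · rw [hq] at h
        injection h with hp hps
        subst hp; subst hps
        simpa [tailsGlue] using ih q qs hq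

theorem splitSemi_noSemi (l : List Char) (p : List Char) (hp : p ∈ splitSemi l) : ';' ∉ p := by
  induction l generalizing p with
  | nil => simp [splitSemi] at hp; simp [hp]
  | cons c rest ih =>
    by_cases hc : c = ';'
    · subst hc
      simp [splitSemi] at hp
      rcases hp with h | h
      · simp [h]
      · exact ih p h
    · simp only [splitSemi, if_neg hc] at hp
      rcases hq : splitSemi rest with _ | ⟨q, qs⟩
      · exact absurd hq (splitSemi_ne_nil rest)
      · rw [hq] at hp
        simp at hp
        rcases hp with h | h
        · subst h
          intro hmem
          simp at hmem
          rcases hmem with h | h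
          · exact hc h.symm
          · exact ih q (by simp [hq]) h
        · exact ih p (by simp [hq, h])

theorem aLoop_append (p rest : List Char) (e : Bool) (hp : ';' ∉ p) :
    pvALoop (p ++ rest) e = p ++ pvALoop rest (escAfter p e) := by
  induction p generalizing e with
  | nil => simp [escAfter]
  | cons c t ih =>
    simp at hp
    have hc : (c == ';') = false := by
      simp only [beq_eq_false_iff_ne, ne_eq]
      exact fun hh => hp.1 hh.symm
    simp [pvALoop, escAfter, hc, ih _ hp.2]

theorem escAfter_append (u v : List Char) (e : Bool) :
    escAfter (u ++ v) e = escAfter v (escAfter u e) := by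
  induction u generalizing e with
  | nil => simp [escAfter]
  | cons c t ih => simp [escAfter, ih]

theorem escAfter_parity (p : List Char) :
    escAfter p false = decide (pvTrailBS p % 2 = 1) := by
  induction p using List.reverseRecOn with
  | nil => simp [escAfter, pvTrailBS, pvTrailBSCount]
  | append_singleton t c ih =>
    rw [escAfter_append, ih]
    unfold pvTrailBS
    simp only [List.reverse_append, List.reverse_singleton, List.singleton_append]
    by_cases hc : c = '\\'
    · subst hc
      simp only [pvTrailBSCount, escAfter]
      have : ∀ n : Nat, (!decide (n % 2 = 1)) = decide ((n + 1) % 2 = 1) := by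
        intro n; by_cases h : n % 2 = 1 <;> simp [h] <;> omega
      simp [this]
    · have hcb : (c == '\\') = false := by simp [hc]
      simp [pvTrailBSCount, hc, escAfter, hcb]

theorem trailBSCount_append (u : List Char) (c : Char) (v : List Char) (hc : c ≠ '\\') :
    pvTrailBSCount (u ++ c :: v) = pvTrailBSCount u := by
  induction u with
  | nil => simp [pvTrailBSCount, hc]
  | cons d t ih =>
    by_cases hd : d = '\\'
    · simp [pvTrailBSCount, hd, ih]
    · simp [pvTrailBSCount, hd]

theorem trailBS_append_semi (u v : List Char) : pvTrailBS (u ++ ';' :: v) = pvTrailBS v := by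
  unfold pvTrailBS
  simp only [List.reverse_append, List.reverse_cons]
  rw [List.append_assoc, List.singleton_append]
  exact trailBSCount_append v.reverse ';' u.reverse (by decide)

theorem main_join (ps : List (List Char)) (kept : List Char)
    (h : ∀ p ∈ ps, ';' ∉ p) :
    kept ++ pvALoop (tailsGlue ps) (decide (pvTrailBS kept % 2 = 1)) = pvBJoin kept ps := by
  induction ps generalizing kept with
  | nil => simp [tailsGlue, pvALoop, pvBJoin]
  | cons part rest ih =>
    simp only [tailsGlue, List.map_cons, List.flatten_cons]
    by_cases hpar : pvTrailBS kept % 2 = 1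
    · simp only [hpar, decide_true]
      have : (';' :: part) ++ (rest.map (';' :: ·)).flatten
          = ';' :: (part ++ tailsGlue rest) := by simp [tailsGlue]
      rw [this]
      have h1 : pvALoop (';' :: (part ++ tailsGlue rest)) true
          = ';' :: pvALoop (part ++ tailsGlue rest) false := by
        simp [pvALoop]
      rw [h1, aLoop_append part (tailsGlue rest) false (h part (by simp))]
      rw [escAfter_parity part, ← trailBS_append_semi kept part]
      have h2 : kept ++ ';' :: (part ++ pvALoop (tailsGlue rest)
            (decide (pvTrailBS (kept ++ ';' :: part) % 2 = 1)))
          = (kept ++ ';' :: part) ++ pvALoop (tailsGlue rest)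
            (decide (pvTrailBS (kept ++ ';' :: part) % 2 = 1)) := by simp
      rw [h2, ih (kept ++ ';' :: part) (fun p hp => h p (by simp [hp]))]
      simp [pvBJoin, hpar]
    · simp only [hpar, decide_false]
      have h1 : pvALoop ((';' :: part) ++ (rest.map (';' :: ·)).flatten) false = [] := by
        simp [pvALoop]
      rw [h1]
      simp [pvBJoin, hpar]

theorem core_eq (l : List Char) :
    pvALoop l false = (match splitSemi l with
      | [] => []
      | p :: ps => pvBJoin p ps) := by
  rcases hsp : splitSemi l with _ | ⟨p, ps⟩
  · exact absurd hsp (splitSemi_ne_nil l)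
  · have hl := splitSemi_decomp l p ps hsp
    have hp : ';' ∉ p := splitSemi_noSemi l p (by simp [hsp])
    rw [hl, aLoop_append p (tailsGlue ps) false hp, escAfter_parity p]
    exact main_join ps p (fun q hq => splitSemi_noSemi l q (by simp [hsp, hq]))

-- ===== VERDICT (by name: the statement is the Claim_ definition above) =====
theorem strip_comment_spec : Claim_equal_strip_comment := by
  intro line _
  unfold Spec_strip_comment strip_comment strip_comment_alt
  rw [splitOn_semi]
  rcases hsp : splitSemi line.toList with _ | ⟨p, ps⟩
  · exact absurd hsp (splitSemi_ne_nil line.toList)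
  · have hc := core_eq line.toList
    rw [hsp] at hc
    simp only at hc
    rw [hc]
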